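-- pv_equiv track=rewrite | github.com/aayn/crar-pytorch | test/test_experience.py | compute_segment_indices
-- ===== SOURCE A (Python) =====
-- def compute_segment_indices(buffer, num_segments):
--     if num_segments > len(buffer):
--         raise ValueError("Number of segments > buffer size.")
--     segment_indices = []
--     idx = 0
--     increment = len(buffer) // num_segments
--     mod = len(buffer) % num_segments
--     for i in range(num_segments):
--         segment_indices.append(idx)
--         idx += increment + int(i < mod)
--     return segment_indices
-- ===== SOURCE B (Python) =====
-- def compute_segment_indices(buffer, num_segments):
--     if num_segments > len(buffer):
--         raise ValueError("Number of segments > buffer size.")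
--     inc = len(buffer) // num_segments
--     mod = len(buffer) % num_segments
--     # first `mod` segments have size inc+1, the rest size inc: two staged closed-form passes
--     big = [i * (inc + 1) for i in range(mod)]
--     rest = [mod * (inc + 1) + j * inc for j in range(num_segments - mod)]
--     return big + rest
-- ===== Notes on version B (the rewrite author's own statement) =====
-- stated objective: alternative
-- what changed: Replaced A's single accumulator loop threading a running index with two independent closed-form passes: starts of the mod oversized segments (i*(inc+1)) and starts of the remaining uniform segments (mod*(inc+1)+j*inc), concatenated.
import Mathlib
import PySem

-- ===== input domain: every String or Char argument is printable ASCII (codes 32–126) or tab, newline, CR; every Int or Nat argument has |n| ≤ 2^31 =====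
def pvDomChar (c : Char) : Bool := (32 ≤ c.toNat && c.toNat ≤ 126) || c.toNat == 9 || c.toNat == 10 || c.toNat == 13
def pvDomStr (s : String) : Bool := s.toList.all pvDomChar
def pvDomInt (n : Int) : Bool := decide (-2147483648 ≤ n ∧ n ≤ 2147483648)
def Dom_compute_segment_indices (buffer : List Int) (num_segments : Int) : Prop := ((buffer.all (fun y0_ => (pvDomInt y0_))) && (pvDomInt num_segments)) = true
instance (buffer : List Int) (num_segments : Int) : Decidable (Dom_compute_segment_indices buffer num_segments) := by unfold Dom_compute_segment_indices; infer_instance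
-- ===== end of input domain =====

-- B replaces A's running-index accumulator loop with two independent closed-form passes
-- (starts of the oversized segments, then starts of the uniform segments), concatenated.
-- ===== PORT A =====
def compute_segment_indices (buffer : List Int) (num_segments : Int) : List Int :=
  if num_segments > (buffer.length : Int) then []  -- ValueError in Python; excluded by Pre_
  else
    let increment := PySem.Int.floordiv (buffer.length : Int) num_segments  -- ZeroDivisionError at 0; excluded by Pre_
    let md := PySem.Int.mod (buffer.length : Int) num_segments
    ((PySem.List.pyRange 0 num_segments 1).foldl
      (fun (s : List Int × Int) i => (s.1 ++ [s.2], s.2 + increment + (if i < md then 1 else 0)))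
      ([], 0)).1

-- ===== PORT B =====
def compute_segment_indices_alt (buffer : List Int) (num_segments : Int) : List Int :=
  if num_segments > (buffer.length : Int) then []  -- ValueError in Python; excluded by Pre_
  else
    let inc := PySem.Int.floordiv (buffer.length : Int) num_segments
    let md := PySem.Int.mod (buffer.length : Int) num_segments
    (PySem.List.pyRange 0 md 1).map (fun i => i * (inc + 1))
      ++ (PySem.List.pyRange 0 (num_segments - md) 1).map (fun j => md * (inc + 1) + j * inc)

-- ===== PRECONDITION & SPEC =====
-- Pre_ excludes exactly the inputs where A raises: ValueError when num_segments > len(buffer),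
-- ZeroDivisionError when num_segments == 0.
def Pre_compute_segment_indices (buffer : List Int) (num_segments : Int) : Prop :=
  num_segments ≤ (buffer.length : Int) ∧ num_segments ≠ 0
instance (buffer : List Int) (num_segments : Int) : Decidable (Pre_compute_segment_indices buffer num_segments) := by unfold Pre_compute_segment_indices; infer_instance
def pvWitness_compute_segment_indices : List Int × Int := ([1, 2, 3, 4, 5], 2)
def Spec_compute_segment_indices (buffer : List Int) (num_segments : Int) (out : List Int) : Prop := out = compute_segment_indices_alt buffer num_segments
instance (buffer : List Int) (num_segments : Int) (out : List Int) : Decidable (Spec_compute_segment_indices buffer num_segments out) := by unfold Spec_compute_segment_indices; infer_instance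

-- ===== CLAIM =====
def Claim_equal_compute_segment_indices : Prop := ∀ (buffer : List Int) (num_segments : Int), Dom_compute_segment_indices buffer num_segments → Pre_compute_segment_indices buffer num_segments → Spec_compute_segment_indices buffer num_segments (compute_segment_indices buffer num_segments)

-- ===== LEMMAS AND PROOFS =====
-- A's loop invariant: the accumulator idx at step a equals a*inc + min a md.
lemma csi_loop (inc md : Int) : ∀ (n : Nat) (a b : Int) (acc : List Int), (b - a).toNat = n →
    ((PySem.List.pyRange a b 1).foldl
      (fun (s : List Int × Int) i => (s.1 ++ [s.2], s.2 + inc + (if i < md then 1 else 0)))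
      (acc, a * inc + min a md)).1
    = acc ++ (PySem.List.pyRange a b 1).map (fun i => i * inc + min i md) := by
  intro n
  induction n with
  | zero =>
    intro a b acc h
    rw [PySem.List.pyRange_one_eq_nil (by omega)]
    simp
  | succ k ih =>
    intro a b acc h
    rw [PySem.List.pyRange_one_cons (by omega)]
    simp only [List.foldl_cons, List.map_cons]
    have hstep : a * inc + min a md + inc + (if a < md then 1 else 0)
        = (a + 1) * inc + min (a + 1) md := by
      have hm : min (a + 1) md = min a md + (if a < md then 1 else 0) := by
        split_ifs <;> omega
      rw [hm, add_one_mul]; ring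
    rw [hstep, ih (a + 1) b (acc ++ [a * inc + min a md]) (by omega)]
    simp

-- The invariant's closed form splits into B's two staged passes.
lemma csi_split (inc md k : Int) (h0 : 0 ≤ md) (hk : md ≤ k) :
    (PySem.List.pyRange 0 k 1).map (fun i => i * inc + min i md)
      = (PySem.List.pyRange 0 md 1).map (fun i => i * (inc + 1))
        ++ (PySem.List.pyRange 0 (k - md) 1).map (fun j => md * (inc + 1) + j * inc) := by
  rw [PySem.List.pyRange_one_append 0 md k h0 hk, List.map_append]
  congr 1
  · apply List.map_congr_left
    intro i hi
    rw [PySem.List.mem_pyRange_one] at hi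
    have : min i md = i := by omega
    rw [this]; ring
  · rw [PySem.List.pyRange_one, PySem.List.pyRange_one, List.map_map, List.map_map]
    have hlen : (k - md - 0).toNat = (k - md).toNat := by omega
    rw [hlen]
    apply List.map_congr_left
    intro t _
    simp only [Function.comp]
    have : min (md + (t : Int)) md = md := by omega
    rw [this]; ring

-- ===== VERDICT =====
theorem compute_segment_indices_spec : Claim_equal_compute_segment_indices := by
  intro buffer num_segments _ hpre
  obtain ⟨hle, hne⟩ := hpre
  unfold Spec_compute_segment_indices compute_segment_indices compute_segment_indices_alt
  rw [if_neg (by omega), if_neg (by omega)]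
  by_cases hpos : 0 < num_segments
  · have hmd0 := PySem.Int.mod_nonneg (buffer.length : Int) hpos
    have hmdlt := PySem.Int.mod_lt (buffer.length : Int) hpos
    have h0 : (0 : Int) * PySem.Int.floordiv (buffer.length : Int) num_segments
        + min 0 (PySem.Int.mod (buffer.length : Int) num_segments) = 0 := by
      rw [min_eq_left hmd0]; ring
    have hA := csi_loop (PySem.Int.floordiv (buffer.length : Int) num_segments)
      (PySem.Int.mod (buffer.length : Int) num_segments)
      (num_segments - 0).toNat 0 num_segments [] rfl
    rw [h0] at hA
    simp only [List.nil_append] at hA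
    rw [hA]
    exact csi_split _ _ _ hmd0 (by omega)
  · have hneg : num_segments < 0 := by omega
    obtain ⟨hlt, hle0⟩ := PySem.Int.mod_neg_bounds (buffer.length : Int) hneg
    have hA : PySem.List.pyRange 0 num_segments 1 = [] :=
      PySem.List.pyRange_one_eq_nil (by omega)
    have hB1 : PySem.List.pyRange 0 (PySem.Int.mod (buffer.length : Int) num_segments) 1 = [] :=
      PySem.List.pyRange_one_eq_nil (by omega)
    have hB2 : PySem.List.pyRange 0
        (num_segments - PySem.Int.mod (buffer.length : Int) num_segments) 1 = [] :=
      PySem.List.pyRange_one_eq_nil (by omega)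
    simp [hA, hB1, hB2]
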